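-- pv_equiv track=rewrite | github.com/shibarmycto/cfsmsv3 | scripts/send_sms.py | _parse_error
-- ===== SOURCE A (Python) =====
-- def _parse_error(error_text: str) -> str:
--     """Parse error response to error code."""
--     error_map = {
--         'ERROR:1': 'INVALID_CREDENTIALS',
--         'ERROR:2': 'INSUFFICIENT_CREDITS',
--         'ERROR:3': 'INVALID_DESTINATION',
--         'ERROR:4': 'INVALID_SENDER_ID',
--         'ERROR:5': 'MESSAGE_TOO_LONG',
--     }
--     for code, name in error_map.items():
--         if error_text.startswith(code):
--             return name
--     return 'UNKNOWN_ERROR'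
-- ===== SOURCE B (Python) =====
-- def _parse_error(error_text: str) -> str:
--     """Parse error response to error code."""
--     if not error_text.startswith('ERROR:'):
--         return 'UNKNOWN_ERROR'
--     codes = {
--         '1': 'INVALID_CREDENTIALS',
--         '2': 'INSUFFICIENT_CREDITS',
--         '3': 'INVALID_DESTINATION',
--         '4': 'INVALID_SENDER_ID',
--         '5': 'MESSAGE_TOO_LONG',
--     }
--     return codes.get(error_text[6:7], 'UNKNOWN_ERROR')
-- ===== Notes on version B (the rewrite author's own statement) =====
-- stated objective: simpler
-- what changed: Instead of scanning the prefix map and running startswith once per entry, B checks the fixed prefix once, extracts the digit character with a slice, and resolves it by one dictionary lookup.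
import Mathlib
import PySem

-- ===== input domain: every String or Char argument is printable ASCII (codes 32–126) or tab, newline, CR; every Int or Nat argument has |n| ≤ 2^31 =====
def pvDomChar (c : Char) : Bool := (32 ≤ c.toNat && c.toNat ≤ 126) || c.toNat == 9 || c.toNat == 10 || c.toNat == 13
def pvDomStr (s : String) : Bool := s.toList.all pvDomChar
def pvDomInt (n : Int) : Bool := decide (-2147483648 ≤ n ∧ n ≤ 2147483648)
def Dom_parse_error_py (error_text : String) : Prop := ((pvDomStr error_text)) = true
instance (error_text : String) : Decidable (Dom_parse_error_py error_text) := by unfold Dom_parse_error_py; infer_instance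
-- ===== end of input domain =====

-- B replaces A's linear scan of the prefix map (one startswith test per entry) by a single
-- fixed-prefix check, a one-character slice, and one dictionary lookup (objective: simpler).

-- ===== PORT A =====
def pvErrorMap : List (String × String) :=
  [("ERROR:1", "INVALID_CREDENTIALS"), ("ERROR:2", "INSUFFICIENT_CREDITS"),
   ("ERROR:3", "INVALID_DESTINATION"), ("ERROR:4", "INVALID_SENDER_ID"),
   ("ERROR:5", "MESSAGE_TOO_LONG")]

-- the 'for code, name in error_map.items(): if startswith: return name' loop
def pvScan (error_text : String) : List (String × String) → String
  | [] => "UNKNOWN_ERROR"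
  | (code, name) :: rest =>
      if PySem.Str.startswith error_text code then name else pvScan error_text rest

def parse_error_py (error_text : String) : String := pvScan error_text pvErrorMap

-- ===== PORT B =====
def pvCodes : PySem.Dict String String :=
  PySem.Dict.ofList
    [("1", "INVALID_CREDENTIALS"), ("2", "INSUFFICIENT_CREDITS"),
     ("3", "INVALID_DESTINATION"), ("4", "INVALID_SENDER_ID"),
     ("5", "MESSAGE_TOO_LONG")]

def parse_error_py_alt (error_text : String) : String :=
  if !PySem.Str.startswith error_text "ERROR:" then "UNKNOWN_ERROR"
  else PySem.Dict.getD pvCodes (PySem.Str.slice error_text (some 6) (some 7)) "UNKNOWN_ERROR"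

-- ===== PRECONDITION & SPEC =====
def Spec_parse_error_py (error_text : String) (out : String) : Prop := out = parse_error_py_alt error_text
instance (error_text : String) (out : String) : Decidable (Spec_parse_error_py error_text out) := by unfold Spec_parse_error_py; infer_instance

-- ===== CLAIM (what is proved, stated in full; the proofs are below) =====
def Claim_equal_parse_error_py : Prop := ∀ (error_text : String), Dom_parse_error_py error_text → Spec_parse_error_py error_text (parse_error_py error_text)

-- ===== LEMMAS AND PROOFS =====
lemma sw_app (p q l : List Char) :
    PySem.Chars.startswith (p ++ l) (p ++ q) = PySem.Chars.startswith l q := by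
  rw [Bool.eq_iff_iff, PySem.Chars.startswith_iff, PySem.Chars.startswith_iff]
  exact List.prefix_append_right_inj p

lemma sw_single (c k : Char) (t : List Char) :
    PySem.Chars.startswith (c :: t) [k] = (c == k) := by
  rw [Bool.eq_iff_iff, PySem.Chars.startswith_iff, List.cons_prefix_cons]
  simp [eq_comm (a := k)]

lemma key_beq (a b : String) : (a == b) = decide (a.toList = b.toList) := by
  rw [Bool.eq_iff_iff]
  simp [String.ext_iff]

lemma parse_error_eq (s : String) : parse_error_py s = parse_error_py_alt s := by
  unfold parse_error_py parse_error_py_alt pvScan pvErrorMap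
  by_cases h : PySem.Chars.startswith s.toList "ERROR:".toList = true
  · obtain ⟨t, ht⟩ := (PySem.Chars.startswith_iff _ _).mp h
    have hk : (PySem.Str.slice s (some 6) (some 7)).toList = t.take 1 := by
      have h6 : ((6:ℤ)) = ((6:ℕ):ℤ) := by norm_num
      have h7 : ((7:ℤ)) = ((7:ℕ):ℤ) := by norm_num
      simp only [PySem.Str.slice, h6, h7, PySem.Chars.slice_eq_listSlice, PySem.List.slice_natCast]
      rw [← ht]
      have e0 : "ERROR:".toList = ['E','R','R','O','R',':'] := rfl
      rw [e0]
      simp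
    have hsw : (PySem.Str.startswith s "ERROR:") = true := by
      rw [PySem.Str.startswith_eq]; exact h
    have swlit : ∀ (u : List Char) (k : Char),
        PySem.Chars.startswith ('E'::'R'::'R'::'O'::'R'::':'::u) ['E','R','R','O','R',':',k]
          = PySem.Chars.startswith u [k] := fun u k => sw_app "ERROR:".toList [k] u
    have swlit0 : ∀ (u : List Char),
        PySem.Chars.startswith ('E'::'R'::'R'::'O'::'R'::':'::u) ['E','R','R','O','R',':'] = true := by
      intro u
      rw [PySem.Chars.startswith_iff]
      exact ⟨u, rfl⟩
    rcases t with _ | ⟨c, t'⟩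
    · simp only [pvScan, PySem.Str.startswith_eq, ← ht, hsw]
      simp [swlit, swlit0, PySem.Chars.startswith, pvCodes, PySem.Dict.getD, PySem.Dict.get?,
            PySem.Dict.ofList, PySem.Dict.update, PySem.Dict.insert, PySem.Dict.contains,
            PySem.Dict.empty, key_beq, hk]
    · simp only [pvScan, PySem.Str.startswith_eq, ← ht, hsw]
      simp [swlit, swlit0, sw_single, pvCodes, PySem.Dict.getD, PySem.Dict.get?,
            PySem.Dict.ofList, PySem.Dict.update, PySem.Dict.insert, PySem.Dict.contains,
            PySem.Dict.empty, key_beq, hk]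
      simp only [List.find?, show "1".toList = ['1'] from rfl, show "2".toList = ['2'] from rfl,
        show "3".toList = ['3'] from rfl, show "4".toList = ['4'] from rfl,
        show "5".toList = ['5'] from rfl, List.cons.injEq, and_true]
      simp only [show ∀ (d : Char), (d = c) = (c = d) from fun d => propext ⟨Eq.symm, Eq.symm⟩]
      by_cases h1 : c = '1' <;> by_cases h2 : c = '2' <;> by_cases h3 : c = '3' <;>
        by_cases h4 : c = '4' <;> by_cases h5 : c = '5' <;> simp_all
  · have h1 : ∀ k : Char, PySem.Chars.startswith s.toList ("ERROR:".toList ++ [k]) = false := by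
      intro k
      rw [Bool.eq_false_iff]
      intro hc
      exact h ((PySem.Chars.startswith_iff _ _).mpr
        ((List.prefix_append _ _).trans ((PySem.Chars.startswith_iff _ _).mp hc)))
    have h1' : ∀ k : Char, PySem.Chars.startswith s.toList ['E','R','R','O','R',':',k] = false := h1
    rw [Bool.not_eq_true] at h
    have h0 : PySem.Chars.startswith s.toList ['E','R','R','O','R',':'] = false := h
    simp [pvScan, PySem.Str.startswith_eq, h1', h0]

-- ===== VERDICT (by name: the statement is the Claim_ definition above) =====
theorem parse_error_py_spec : Claim_equal_parse_error_py := by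
  intro s _
  unfold Spec_parse_error_py
  exact parse_error_eq s
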